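-- pv_equiv track=rewrite | github.com/adrianknorr/kniffel | Kniffel.py | join_two_lists
-- ===== SOURCE A (Python) =====
-- def join_two_lists(left, right, free):
--     result = []
--     len_left = len(left)
--     len_right = len(right)
--     free = " " * free
--     if len_right > len_left:
--         free_left = " " * len(left[0])
--         len_add = len_right - len_left
--         for a, b in zip(left, right):
--             result.append(a + free + str(b))
--         for i in range(len_left, len_right):
--             result.append(free_left + free + str(right[i]))
--     if len_right == len_left:
--         for a, b in zip(left, right):
--             result.append(a + free + str(b))
--     if len_left > len_right:
--         free_right = " " * len(right[0])
--         len_add = len_left - len_right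
--         for a, b in zip(left, right):
--             result.append(a + free + str(b))
--         for i in range(len_right, len_left):
--             result.append(left[i] + free + free_right)
--
--     return(result)
-- ===== SOURCE B (Python) =====
-- def join_two_lists(left, right, free):
--     pad = " " * free
--     lfill = " " * len(left[0]) if len(right) > len(left) else None
--     rfill = " " * len(right[0]) if len(left) > len(right) else None
--     it_l, it_r = iter(left), iter(right)
--     result = []
--     while True:
--         a = next(it_l, None)
--         b = next(it_r, None)
--         if a is None and b is None:
--             return result
--         result.append((a if a is not None else lfill) + pad + (str(b) if b is not None else rfill))
-- ===== Notes on version B (the rewrite author's own statement) =====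
-- stated objective: simpler
-- what changed: Instead of three branch-specific loop pairs over zip and index ranges, B precomputes the two fill strings once and runs a single iterator-exhaustion loop that consumes both lists head-by-head, substituting the fill for whichever side is exhausted.
-- outside the precondition, e.g. on join_two_lists([], ['x'], 1): A raises IndexError, B raises IndexError; on join_two_lists(['a', 'b'], [], 0): A raises IndexError, B raises IndexError
import Mathlib
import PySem

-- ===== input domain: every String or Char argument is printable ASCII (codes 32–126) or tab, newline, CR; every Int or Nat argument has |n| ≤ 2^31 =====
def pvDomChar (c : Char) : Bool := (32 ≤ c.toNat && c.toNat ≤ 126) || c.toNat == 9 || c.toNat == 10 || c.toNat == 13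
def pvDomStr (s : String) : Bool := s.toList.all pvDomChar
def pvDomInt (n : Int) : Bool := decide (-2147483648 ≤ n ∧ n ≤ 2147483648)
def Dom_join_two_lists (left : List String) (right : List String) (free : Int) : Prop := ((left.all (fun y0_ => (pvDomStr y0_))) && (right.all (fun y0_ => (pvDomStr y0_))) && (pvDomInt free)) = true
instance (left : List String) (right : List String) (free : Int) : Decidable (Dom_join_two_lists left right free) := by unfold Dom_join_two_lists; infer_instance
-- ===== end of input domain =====

-- B replaces A's three branch-specific loop pairs by one head-by-head pass over both lists
-- with precomputed fill strings (objective: simpler; same cost).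

-- ===== PORT A =====
-- " " * n  (Python: empty for n ≤ 0; Int.toNat clamps exactly so)
def pvSpaces (n : Int) : String := String.ofList (List.replicate n.toNat ' ')

def join_two_lists (left : List String) (right : List String) (free : Int) : List String :=
  let result : List String := []
  let len_left := left.length
  let len_right := right.length
  let free' := pvSpaces free
  if len_right > len_left then
    -- left[0] would raise IndexError on empty left; Pre_ excludes that (pyGetD default unreached)
    let free_left := pvSpaces (PySem.Str.len (PySem.List.pyGetD left 0 ""))
    let r1 := (left.zip right).foldl (fun acc ab => acc ++ [ab.1 ++ free' ++ ab.2]) result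
    (PySem.List.pyRange len_left len_right 1).foldl
      (fun acc i => acc ++ [free_left ++ free' ++ PySem.List.pyGetD right i ""]) r1
  else if len_right = len_left then
    (left.zip right).foldl (fun acc ab => acc ++ [ab.1 ++ free' ++ ab.2]) result
  else
    -- right[0] would raise IndexError on empty right; Pre_ excludes that
    let free_right := pvSpaces (PySem.Str.len (PySem.List.pyGetD right 0 ""))
    let r1 := (left.zip right).foldl (fun acc ab => acc ++ [ab.1 ++ free' ++ ab.2]) result
    (PySem.List.pyRange len_right len_left 1).foldl
      (fun acc i => acc ++ [PySem.List.pyGetD left i "" ++ free' ++ free_right]) r1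

-- ===== PORT B =====
-- Source B's while loop: one row per step, consuming both iterators together; an exhausted side
-- contributes its fill string ('None' in Source B when a fill is never needed; ported as "", unreached)
def altGo (pad lfill rfill : String) : List String → List String → List String
  | [], [] => []
  | [], b :: r => (lfill ++ pad ++ b) :: altGo pad lfill rfill [] r
  | a :: l, [] => (a ++ pad ++ rfill) :: altGo pad lfill rfill l []
  | a :: l, b :: r => (a ++ pad ++ b) :: altGo pad lfill rfill l r

def join_two_lists_alt (left : List String) (right : List String) (free : Int) : List String :=
  let pad := pvSpaces free
  let lfill := if right.length > left.length then pvSpaces (PySem.Str.len (PySem.List.pyGetD left 0 "")) else ""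
  let rfill := if left.length > right.length then pvSpaces (PySem.Str.len (PySem.List.pyGetD right 0 "")) else ""
  altGo pad lfill rfill left right

-- ===== PRECONDITION & SPEC =====
-- Pre_ excludes exactly the inputs where A raises IndexError: the shorter of the two lists is empty
-- while the other is nonempty (A reads shorter[0] for the fill width). B raises there too.
def Pre_join_two_lists (left : List String) (right : List String) (free : Int) : Prop :=
  (left.length < right.length → left ≠ []) ∧ (right.length < left.length → right ≠ [])
instance (left : List String) (right : List String) (free : Int) : Decidable (Pre_join_two_lists left right free) := by unfold Pre_join_two_lists; infer_instance

def pvWitness_join_two_lists : List String × List String × Int := (["ab"], ["x", "yz"], 2)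

def Spec_join_two_lists (left : List String) (right : List String) (free : Int) (out : List String) : Prop := out = join_two_lists_alt left right free
instance (left : List String) (right : List String) (free : Int) (out : List String) : Decidable (Spec_join_two_lists left right free out) := by unfold Spec_join_two_lists; infer_instance

-- ===== CLAIM (what is proved, stated in full; the proofs are below) =====
def Claim_equal_join_two_lists : Prop := ∀ (left : List String) (right : List String) (free : Int), Dom_join_two_lists left right free → Pre_join_two_lists left right free → Spec_join_two_lists left right free (join_two_lists left right free)

-- ===== LEMMAS AND PROOFS =====

-- characterisation of B's recursion: zip part, then whichever tail remains (at most one is nonempty)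
lemma altGo_eq (pad lfill rfill : String) (l r : List String) :
    altGo pad lfill rfill l r
      = (l.zip r).map (fun ab => ab.1 ++ pad ++ ab.2)
        ++ (r.drop l.length).map (fun b => lfill ++ pad ++ b)
        ++ (l.drop r.length).map (fun a => a ++ pad ++ rfill) := by
  induction l generalizing r with
  | nil =>
    induction r with
    | nil => simp [altGo]
    | cons b bs ih => simp [altGo, ih]
  | cons a as ih =>
    cases r with
    | nil =>
      have := ih []
      simp [altGo] at this ⊢
      simpa using this
    | cons b bs => simp [altGo, ih bs]

-- ===== VERDICT (by name: the statement is the Claim_ definition above) =====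
theorem join_two_lists_spec : Claim_equal_join_two_lists := by
  intro left right free _ hpre
  unfold Spec_join_two_lists join_two_lists join_two_lists_alt
  simp only []
  rw [altGo_eq]
  rcases Nat.lt_trichotomy left.length right.length with h | h | h
  · rw [if_pos h, if_pos h, if_neg (by omega)]
    simp only [PySem.List.foldl_append_singleton_eq_map, List.nil_append]
    rw [List.drop_eq_nil_of_le (as := left) (by omega), List.map_nil, List.append_nil]
    congr 1
    have h1 := congrArg
      (List.map (fun b => pvSpaces (PySem.Str.len (PySem.List.pyGetD left 0 "")) ++ pvSpaces free ++ b))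
      (PySem.List.map_pyGetD_pyRange' right "" (a := (left.length : Int)) (by positivity))
    rw [List.map_map] at h1
    simp only [Int.toNat_natCast, Function.comp_def] at h1
    exact h1
  · rw [if_neg (by omega), if_pos (by omega), if_neg (by omega), if_neg (by omega)]
    simp only [PySem.List.foldl_append_singleton_eq_map, List.nil_append]
    rw [List.drop_eq_nil_of_le (as := right) (by omega),
        List.drop_eq_nil_of_le (as := left) (by omega)]
    simp
  · rw [if_neg (by omega), if_neg (by omega), if_neg (by omega), if_pos h]
    simp only [PySem.List.foldl_append_singleton_eq_map, List.nil_append]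
    rw [List.drop_eq_nil_of_le (as := right) (le_of_lt h), List.map_nil, List.append_nil]
    congr 1
    have h1 := congrArg
      (List.map (fun a => a ++ pvSpaces free ++ pvSpaces (PySem.Str.len (PySem.List.pyGetD right 0 ""))))
      (PySem.List.map_pyGetD_pyRange' left "" (a := (right.length : Int)) (by positivity))
    rw [List.map_map] at h1
    simp only [Int.toNat_natCast, Function.comp_def] at h1
    exact h1
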